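-- pv_equiv track=rewrite | github.com/gavieeen/simulations | LCQ/test17.py | find_quadruples_brute
-- ===== SOURCE A (Python) =====
-- def find_quadruples_brute(nums):
--     n = len(nums)
--     quadruples = 0
--
--     for a in range(n):
--         for b in range(a + 1, n):
--             for c in range(b + 1, n):
--                 for d in range(c + 1, n):
--                     if nums[a] + nums[b] + nums[c] == nums[d]:
--                         quadruples += 1
--
--     return quadruples
-- ===== SOURCE B (Python) =====
-- def find_quadruples_brute(nums):
--     # One forward pass with a suffix-value counter: for each index c, count
--     # pairs a<b<c via the d-values remaining to the right. O(n^3) vs A's O(n^4).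
--     suffix = {}
--     for x in nums:
--         suffix[x] = suffix.get(x, 0) + 1
--     count = 0
--     prefix = []
--     for x in nums:
--         suffix[x] -= 1
--         for i in range(len(prefix)):
--             for j in range(i + 1, len(prefix)):
--                 count += suffix.get(prefix[i] + prefix[j] + x, 0)
--         prefix.append(x)
--     return count
-- ===== Notes on version B (the rewrite author's own statement) =====
-- stated objective: faster
-- what changed: Replaces the four nested index loops with a single forward pass that keeps a counter of values still to the right, so each index c adds suffix-counts for all pairs a<b<c instead of scanning d explicitly.
import Mathlib
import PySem

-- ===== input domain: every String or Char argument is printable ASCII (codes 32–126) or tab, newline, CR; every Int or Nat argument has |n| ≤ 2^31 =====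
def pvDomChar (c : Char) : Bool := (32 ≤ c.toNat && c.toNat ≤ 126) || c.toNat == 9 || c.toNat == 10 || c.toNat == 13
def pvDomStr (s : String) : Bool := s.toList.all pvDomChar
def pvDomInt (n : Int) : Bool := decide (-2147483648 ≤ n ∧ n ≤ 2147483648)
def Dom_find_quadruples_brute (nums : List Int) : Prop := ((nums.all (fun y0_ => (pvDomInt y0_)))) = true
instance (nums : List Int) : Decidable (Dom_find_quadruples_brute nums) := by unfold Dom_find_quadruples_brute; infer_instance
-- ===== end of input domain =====

-- B replaces A's four nested index loops by one forward pass with a suffix-value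
-- counter (O(n^3) instead of O(n^4)); ports and the equivalence proof below.


-- ===== PORT A =====
-- literal transliteration of A: four nested index loops, counter quadruples
def find_quadruples_brute (nums : List Int) : Int :=
  let n : Int := PySem.List.len nums
  let quadruples : Int := 0
  (PySem.List.pyRange 0 n 1).foldl (fun quadruples a =>
    (PySem.List.pyRange (a + 1) n 1).foldl (fun quadruples b =>
      (PySem.List.pyRange (b + 1) n 1).foldl (fun quadruples c =>
        (PySem.List.pyRange (c + 1) n 1).foldl (fun quadruples d =>
          if PySem.List.pyGetD nums a 0 + PySem.List.pyGetD nums b 0 + PySem.List.pyGetD nums c 0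
              == PySem.List.pyGetD nums d 0
          then quadruples + 1 else quadruples) quadruples) quadruples) quadruples) quadruples

-- ===== PORT B =====
-- one step of B's main loop: decrement the suffix counter at x, then add the
-- suffix count of prefix[i]+prefix[j]+x over all pairs i<j of the prefix.
-- (suffix[x] -= 1 is ported as modify x 0 (· - 1): the key x, an element of
-- nums, is always present in the counter, so no KeyError is reachable.)
def pvAltStep (st : PySem.Dict Int Int × List Int × Int) (x : Int) :
    PySem.Dict Int Int × List Int × Int :=
  let suffix := st.1.modify x 0 (· - 1)
  let pre := st.2.1
  let m : Int := PySem.List.len pre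
  let count :=
    (PySem.List.pyRange 0 m 1).foldl (fun count i =>
      (PySem.List.pyRange (i + 1) m 1).foldl (fun count j =>
        count + suffix.getD (PySem.List.pyGetD pre i 0 + PySem.List.pyGetD pre j 0 + x) 0)
        count) st.2.2
  (suffix, pre ++ [x], count)

def find_quadruples_brute_alt (nums : List Int) : Int :=
  let suffix := nums.foldl (fun d x => d.insert x (d.getD x 0 + 1)) PySem.Dict.empty
  let st := nums.foldl pvAltStep (suffix, ([], 0))
  st.2.2

-- ===== PRECONDITION & SPEC =====
def Spec_find_quadruples_brute (nums : List Int) (out : Int) : Prop := out = find_quadruples_brute_alt nums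
instance (nums : List Int) (out : Int) : Decidable (Spec_find_quadruples_brute nums out) := by unfold Spec_find_quadruples_brute; infer_instance

-- ===== CLAIM (what is proved, stated in full; the proofs are below) =====
def Claim_equal_find_quadruples_brute : Prop := ∀ (nums : List Int), Dom_find_quadruples_brute nums → Spec_find_quadruples_brute nums (find_quadruples_brute nums)

-- ===== LEMMAS AND PROOFS =====

-- sum of f over the Python range [a, b)
def pvRsum (a b : Int) (f : Int → Int) : Int := ((PySem.List.pyRange a b 1).map f).sum

-- the per-triple summand both sides reduce to: how many d > c have nums[d] = nums[a]+nums[b]+nums[c]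
def pvF (t : List Int) (a b c : Int) : Int :=
  ((t.drop (c + 1).toNat).count
    (PySem.List.pyGetD t a 0 + PySem.List.pyGetD t b 0 + PySem.List.pyGetD t c 0) : Int)

-- B's increment at one step: prefix pre, current value x, remaining suffix s
def pvGp (pre : List Int) (x : Int) (s : List Int) : Int :=
  pvRsum 0 (pre.length : Int) (fun i => pvRsum (i + 1) (pre.length : Int) (fun j =>
    ((s.count (PySem.List.pyGetD pre i 0 + PySem.List.pyGetD pre j 0 + x)) : Int)))

-- total count B accumulates from state (·, pre, ·) over the remaining list
def pvBigB : List Int → List Int → Int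
  | _, [] => 0
  | pre, x :: s => pvGp pre x s + pvBigB (pre ++ [x]) s

lemma pvRsum_empty (a b : Int) (f : Int → Int) (h : b ≤ a) : pvRsum a b f = 0 := by
  simp [pvRsum, PySem.List.pyRange_one_eq_nil h]

lemma pvRsum_succ (a b : Int) (f : Int → Int) (h : a ≤ b) :
    pvRsum a (b + 1) f = pvRsum a b f + f b := by
  simp [pvRsum, PySem.List.pyRange_one_succ_right h]

lemma pvRsum_cons (a b : Int) (f : Int → Int) (h : a < b) :
    pvRsum a b f = f a + pvRsum (a + 1) b f := by
  simp [pvRsum, PySem.List.pyRange_one_cons h]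

lemma pvRsum_congr (a b : Int) (f g : Int → Int)
    (h : ∀ i, a ≤ i → i < b → f i = g i) : pvRsum a b f = pvRsum a b g := by
  unfold pvRsum
  congr 1
  apply List.map_congr_left
  intro i hi
  rw [PySem.List.mem_pyRange_one] at hi
  exact h i hi.1 hi.2

lemma pvRsum_add (a b : Int) (f g : Int → Int) :
    pvRsum a b (fun i => f i + g i) = pvRsum a b f + pvRsum a b g := by
  simpa only [pvRsum] using PySem.List.sum_map_add_int (PySem.List.pyRange a b 1) f g

-- triangle swap: sum over l ≤ i < j < l+k equals sum over l ≤ j, then i < j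
lemma pvTriAux (g : Int → Int → Int) : ∀ (k : Nat) (l : Int),
    pvRsum l (l + k) (fun i => pvRsum (i + 1) (l + k) (fun j => g i j))
    = pvRsum l (l + k) (fun j => pvRsum l j (fun i => g i j)) := by
  intro k
  induction k with
  | zero =>
    intro l
    norm_num
    rw [pvRsum_empty l l _ le_rfl, pvRsum_empty l l _ le_rfl]
  | succ k ih =>
    intro l
    have hcast : l + ((k : Nat) + 1 : Nat) = (l + k) + 1 := by push_cast; ring
    rw [hcast]
    rw [pvRsum_succ l (l + k) _ (by omega), pvRsum_succ l (l + k) _ (by omega)]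
    rw [pvRsum_empty ((l + k) + 1) ((l + k) + 1) _ (by omega)]
    have hstep : pvRsum l (l + k) (fun i => pvRsum (i + 1) ((l + k) + 1) (fun j => g i j))
        = pvRsum l (l + k) (fun i => pvRsum (i + 1) (l + k) (fun j => g i j) + g i (l + k)) := by
      apply pvRsum_congr
      intro i hli hik
      exact pvRsum_succ (i + 1) (l + k) _ (by omega)
    rw [hstep, pvRsum_add, ih l]
    ring

lemma pvTri (l n : Int) (g : Int → Int → Int) :
    pvRsum l n (fun i => pvRsum (i + 1) n (fun j => g i j))
    = pvRsum l n (fun j => pvRsum l j (fun i => g i j)) := by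
  rcases Int.lt_or_le n l with h | h
  · rw [pvRsum_empty _ _ _ (le_of_lt h), pvRsum_empty _ _ _ (le_of_lt h)]
  · have : n = l + ((n - l).toNat : Nat) := by omega
    rw [this]; exact pvTriAux g (n - l).toNat l

-- A's innermost loop over d counts matches in the suffix after c
lemma pvInnerD (t : List Int) (v c q0 : Int) (hc : 0 ≤ c + 1) :
    (PySem.List.pyRange (c + 1) (t.length : Int) 1).foldl
      (fun q d => if v == PySem.List.pyGetD t d 0 then q + 1 else q) q0
    = q0 + ((t.drop (c + 1).toNat).count v : Int) := by
  rw [PySem.List.foldl_pyRange_pyGetD' t 0 (fun q y => if v == y then q + 1 else q) q0 hc]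
  rw [PySem.List.foldl_if_add_one]
  congr 1
  norm_cast
  rw [List.count]
  apply List.countP_congr
  intro y _
  rw [@Bool.beq_comm Int _ _ v y]

lemma pvL3 (t : List Int) (a b q : Int) (hb : 0 ≤ b) :
    (PySem.List.pyRange (b + 1) (t.length : Int) 1).foldl (fun q c =>
      (PySem.List.pyRange (c + 1) (t.length : Int) 1).foldl (fun q d =>
        if PySem.List.pyGetD t a 0 + PySem.List.pyGetD t b 0 + PySem.List.pyGetD t c 0
            == PySem.List.pyGetD t d 0
        then q + 1 else q) q) q
    = q + pvRsum (b + 1) (t.length : Int) (fun c => pvF t a b c) := by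
  rw [PySem.List.foldl_congr_mem _ _ (fun q c => q + pvF t a b c) q ?_]
  · rw [PySem.List.foldl_add]; rfl
  · intro acc c hc
    have h := (PySem.List.mem_pyRange_one.mp hc).1
    exact pvInnerD t _ c acc (by omega)

lemma pvL2 (t : List Int) (a q : Int) (ha : 0 ≤ a) :
    (PySem.List.pyRange (a + 1) (t.length : Int) 1).foldl (fun q b =>
      (PySem.List.pyRange (b + 1) (t.length : Int) 1).foldl (fun q c =>
        (PySem.List.pyRange (c + 1) (t.length : Int) 1).foldl (fun q d =>
          if PySem.List.pyGetD t a 0 + PySem.List.pyGetD t b 0 + PySem.List.pyGetD t c 0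
              == PySem.List.pyGetD t d 0
          then q + 1 else q) q) q) q
    = q + pvRsum (a + 1) (t.length : Int) (fun b =>
        pvRsum (b + 1) (t.length : Int) (fun c => pvF t a b c)) := by
  rw [PySem.List.foldl_congr_mem _ _
      (fun q b => q + pvRsum (b + 1) (t.length : Int) (fun c => pvF t a b c)) q ?_]
  · rw [PySem.List.foldl_add]; rfl
  · intro acc b hb
    have h := (PySem.List.mem_pyRange_one.mp hb).1
    exact pvL3 t a b acc (by omega)

lemma pvA_eq (t : List Int) :
    find_quadruples_brute t
    = pvRsum 0 (t.length : Int) (fun a => pvRsum (a + 1) (t.length : Int) (fun b =>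
        pvRsum (b + 1) (t.length : Int) (fun c => pvF t a b c))) := by
  simp only [find_quadruples_brute, PySem.List.len_eq]
  rw [PySem.List.foldl_congr_mem _ _
      (fun q a => q + pvRsum (a + 1) (t.length : Int) (fun b =>
        pvRsum (b + 1) (t.length : Int) (fun c => pvF t a b c))) 0 ?_]
  · rw [PySem.List.foldl_add]; simp [pvRsum]
  · intro acc a haa
    have h := (PySem.List.mem_pyRange_one.mp haa).1
    exact pvL2 t a acc h

-- B's loop invariant: with the dict counting the remaining list, the loop adds pvBigB
lemma pvLoopB : ∀ (rest pre : List Int) (d : PySem.Dict Int Int) (c0 : Int),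
    (∀ v, d.getD v 0 = (rest.count v : Int)) →
    (rest.foldl pvAltStep (d, pre, c0)).2.2 = c0 + pvBigB pre rest := by
  intro rest
  induction rest with
  | nil => intro pre d c0 _; simp [pvBigB]
  | cons x s ih =>
    intro pre d c0 hd
    have hd' : ∀ v, (d.modify x 0 (fun y => y - 1)).getD v 0 = (s.count v : Int) := by
      intro v
      rw [PySem.Dict.getD_modify]
      by_cases hv : v = x
      · subst hv
        rw [if_pos rfl, hd v, List.count_cons_self]
        push_cast; ring
      · rw [if_neg hv, hd v, List.count_cons_of_ne (fun he => hv he.symm)]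
    have hstep : pvAltStep (d, pre, c0) x
        = (d.modify x 0 (fun y => y - 1), pre ++ [x], c0 + pvGp pre x s) := by
      simp only [pvAltStep, PySem.List.len_eq]
      refine Prod.ext rfl (Prod.ext rfl ?_)
      simp only []
      rw [PySem.List.foldl_congr_mem _ _
          (fun c i => c + pvRsum (i + 1) (pre.length : Int) (fun j =>
            ((s.count (PySem.List.pyGetD pre i 0 + PySem.List.pyGetD pre j 0 + x)) : Int))) c0 ?_]
      · rw [PySem.List.foldl_add]; rfl
      · intro acc i _
        rw [PySem.List.foldl_add]
        congr 1
        unfold pvRsum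
        congr 1
        apply List.map_congr_left
        intro j _
        rw [hd']
    rw [List.foldl_cons, hstep, ih (pre ++ [x]) _ _ hd']
    simp [pvBigB]
    ring

-- pvBigB over a split of t equals the reassociated triple sum from position k on
lemma pvBigB_eq (t : List Int) : ∀ (rest pre : List Int), t = pre ++ rest →
    pvBigB pre rest
    = pvRsum (pre.length : Int) (t.length : Int) (fun c => pvRsum 0 c (fun a =>
        pvRsum (a + 1) c (fun b => pvF t a b c))) := by
  intro rest
  induction rest with
  | nil =>
    intro pre h
    have : t.length = pre.length := by simp [h]
    rw [pvBigB, pvRsum_empty _ _ _ (by omega)]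
  | cons x s ih =>
    intro pre h
    have hlen : t.length = pre.length + 1 + s.length := by simp [h]; omega
    have hcons : pvRsum (pre.length : Int) (t.length : Int) (fun c => pvRsum 0 c (fun a =>
        pvRsum (a + 1) c (fun b => pvF t a b c)))
        = pvRsum 0 (pre.length : Int) (fun a => pvRsum (a + 1) (pre.length : Int) (fun b =>
            pvF t a b (pre.length : Int)))
          + pvRsum ((pre.length : Int) + 1) (t.length : Int) (fun c => pvRsum 0 c (fun a =>
            pvRsum (a + 1) c (fun b => pvF t a b c))) := by
      rw [pvRsum_cons _ _ _ (by omega)]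
    have hpre : ∀ (i : Int), 0 ≤ i → i < (pre.length : Int) →
        PySem.List.pyGetD t i 0 = PySem.List.pyGetD pre i 0 := by
      intro i h0 hi
      subst h
      rw [PySem.List.pyGetD_eq_getElem _ 0 h0 (by simp; omega),
        PySem.List.pyGetD_eq_getElem pre 0 h0 hi]
      exact List.getElem_append_left (by omega)
    have hx : PySem.List.pyGetD t (pre.length : Int) 0 = x := by
      subst h
      rw [PySem.List.pyGetD_eq_getElem _ 0 (by omega) (by simp only [List.length_append, List.length_cons]; push_cast; omega)]
      simp only [Int.toNat_natCast]
      rw [List.getElem_append_right (by omega)]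
      simp
    have hdrop : t.drop (((pre.length : Int) + 1).toNat) = s := by
      have h' : t = (pre ++ [x]) ++ s := by simp [h]
      have : ((pre.length : Int) + 1).toNat = (pre ++ [x]).length := by simp only [List.length_append, List.length_cons, List.length_nil]; omega
      rw [this, h', List.drop_left]
    have hGp : pvGp pre x s
        = pvRsum 0 (pre.length : Int) (fun a => pvRsum (a + 1) (pre.length : Int) (fun b =>
            pvF t a b (pre.length : Int))) := by
      unfold pvGp
      apply pvRsum_congr
      intro a h0a hak
      apply pvRsum_congr
      intro b h0b hbk
      unfold pvF
      rw [hpre a h0a hak, hpre b (by omega) hbk, hx, hdrop]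
    have hih : pvBigB (pre ++ [x]) s
        = pvRsum ((pre.length : Int) + 1) (t.length : Int) (fun c => pvRsum 0 c (fun a =>
            pvRsum (a + 1) c (fun b => pvF t a b c))) := by
      have := ih (pre ++ [x]) (by simp [h])
      simpa [add_comm] using this
    rw [pvBigB, hcons, hGp, hih]

-- ===== VERDICT (by name: the statement is the Claim_ definition above) =====
theorem find_quadruples_brute_spec : Claim_equal_find_quadruples_brute := by
  intro t _
  unfold Spec_find_quadruples_brute
  have hB : find_quadruples_brute_alt t = pvBigB [] t := by
    simp only [find_quadruples_brute_alt]
    rw [PySem.Dict.foldl_insert_getD_add_one_eq_counter,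
      pvLoopB t [] (PySem.Dict.counter t) 0 (fun v => PySem.Dict.getD_counter t v)]
    ring
  have hBig : pvBigB [] t
      = pvRsum 0 (t.length : Int) (fun c => pvRsum 0 c (fun a =>
          pvRsum (a + 1) c (fun b => pvF t a b c))) := by
    simpa using pvBigB_eq t t [] (by simp)
  have h1 : pvRsum 0 (t.length : Int) (fun a => pvRsum (a + 1) (t.length : Int) (fun b =>
        pvRsum (b + 1) (t.length : Int) (fun c => pvF t a b c)))
      = pvRsum 0 (t.length : Int) (fun a => pvRsum (a + 1) (t.length : Int) (fun c =>
        pvRsum (a + 1) c (fun b => pvF t a b c))) :=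
    pvRsum_congr 0 (t.length : Int) _ _
      (fun a _ _ => pvTri (a + 1) (t.length : Int) (fun b c => pvF t a b c))
  rw [pvA_eq, h1, pvTri 0 (t.length : Int) (fun a c => pvRsum (a + 1) c (fun b => pvF t a b c)),
    hB, hBig]
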